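-- pv_equiv track=rewrite | github.com/Mizerael/p-adic_ssu | src/task1/stochastic_parameter.py | gen_orbits
-- ===== SOURCE A (Python) =====
-- from typing import List
--
-- def evolve_func(a: int, x: int, n: int) -> int:
--     return a * x % n
--
-- def gen_orbits(a: int, n: int, gr: List[int]) -> List[List[int]]:
--     Orbits = []
--     while len(gr) > 0:
--         new_oprbit = [gr[0]]
--         gr.remove(gr[0])
--         evolve = evolve_func(a, new_oprbit[-1], n)
--         while evolve in gr:
--             new_oprbit.append(evolve)
--             gr.remove(evolve)
--             evolve = evolve_func(a, new_oprbit[-1], n)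
--         Orbits.append(new_oprbit)
--     return Orbits
-- ===== SOURCE B (Python) =====
-- from typing import List
-- from collections import Counter
--
-- # B computes each orbit in closed form from the rho-shape of the map x -> a*x % n:
-- # walk the distinct-value chain once, detect the cycle, and emit (tail + cycle*k + partial
-- # pass) arithmetically instead of consuming copies one at a time as A does.
-- # (A empties gr in place; B leaves gr untouched -- the equivalence is about the return value.)
--
-- def _make_orbit(a: int, n: int, x: int, rem: Counter) -> List[int]:
--     # phase 1: follow the chain through distinct values, consuming one copy each
--     walked = [x]
--     visited = {x}
--     rem[x] -= 1
--     e = a * x % n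
--     while rem[e] > 0 and e not in visited:
--         walked.append(e)
--         visited.add(e)
--         rem[e] -= 1
--         e = a * e % n
--     if rem[e] > 0:
--         # e was already visited by this orbit: the chain closed into a cycle.
--         # The orbit keeps looping until the scarcest cycle value runs out.
--         cyc = walked[walked.index(e):]
--         k = min(rem[v] for v in cyc)
--         j = next(i for i, v in enumerate(cyc) if rem[v] == k)
--         for v in cyc:
--             rem[v] -= k
--         for v in cyc[:j]:
--             rem[v] -= 1
--         return walked + cyc * k + cyc[:j]
--     return walked
--
-- def gen_orbits(a: int, n: int, gr: List[int]) -> List[List[int]]: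
--     total = Counter(gr)
--     rem = Counter(gr)
--     seen = Counter()
--     orbits = []
--     for x in gr:
--         j = seen[x]
--         seen[x] = j + 1
--         if j < total[x] - rem[x]:
--             continue  # this copy was already consumed by an earlier orbit
--         orbits.append(_make_orbit(a, n, x, rem))
--     return orbits
-- ===== Notes on version B (the rewrite author's own statement) =====
-- stated objective: faster
-- what changed: Instead of A's destructive quadratic peeling (repeated 'in'-scans and list.remove on gr), B walks each orbit's distinct-value chain once, detects when the chain closes into a cycle, and emits the looping part in closed form as tail + cycle*k + partial pass (k = the scarcest cycle value's remaining count), driven by a single scan of gr with counters.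
import Mathlib
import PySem

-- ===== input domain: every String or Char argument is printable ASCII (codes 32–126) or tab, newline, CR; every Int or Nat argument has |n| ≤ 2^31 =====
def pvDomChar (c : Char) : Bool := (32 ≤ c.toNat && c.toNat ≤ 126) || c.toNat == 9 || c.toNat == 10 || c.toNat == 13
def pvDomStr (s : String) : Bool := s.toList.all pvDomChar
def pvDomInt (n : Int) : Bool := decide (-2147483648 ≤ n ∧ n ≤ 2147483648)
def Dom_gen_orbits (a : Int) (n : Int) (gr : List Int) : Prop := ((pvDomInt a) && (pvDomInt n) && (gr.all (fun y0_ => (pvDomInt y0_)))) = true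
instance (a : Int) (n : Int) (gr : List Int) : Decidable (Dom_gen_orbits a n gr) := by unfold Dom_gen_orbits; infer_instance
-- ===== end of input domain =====

-- B replaces A's destructive quadratic peeling by: walk each orbit's distinct-value chain once,
-- detect when it closes into a cycle, and emit the looping part in closed form (tail + cycle*k +
-- partial pass). A empties gr in place, B leaves it untouched — the claim is about the return value.

-- ===== PORT A =====
def evolve_func (a : Int) (x : Int) (n : Int) : Int := PySem.Int.mod (a * x) n

-- inner 'while evolve in gr' loop of A
def genOrbitsInner (a : Int) (n : Int) (new_oprbit : List Int) (gr : List Int) (evolve : Int) :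
    List Int × List Int :=
  if h : evolve ∈ gr then
    genOrbitsInner a n (new_oprbit ++ [evolve]) ((PySem.List.remove? gr evolve).getD gr)
      (evolve_func a (PySem.List.pyGetD (new_oprbit ++ [evolve]) (-1) 0) n)
  else (new_oprbit, gr)
termination_by gr.length
decreasing_by
  have hr := PySem.List.remove?_eq_some_erase (v := evolve) (xs := gr) h
  rw [hr]
  have h1 := List.length_erase_of_mem h
  have h2 : 0 < gr.length := List.length_pos_of_mem h
  simp only [Option.getD_some]
  omega

theorem genOrbitsInner_length_le_aux (a n : Int) : ∀ (N : Nat) (gr o : List Int) (e : Int),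
    gr.length ≤ N → (genOrbitsInner a n o gr e).2.length ≤ gr.length := by
  intro N
  induction N with
  | zero =>
      intro gr o e hN
      have hgr : gr = [] := List.eq_nil_of_length_eq_zero (by omega)
      subst hgr
      rw [genOrbitsInner, dif_neg (by simp)]
  | succ N ih =>
      intro gr o e hN
      rw [genOrbitsInner]
      by_cases h : e ∈ gr
      · rw [dif_pos h]
        have hr := PySem.List.remove?_eq_some_erase (v := e) (xs := gr) h
        rw [hr]
        have h1 := List.length_erase_of_mem h
        have h2 : 0 < gr.length := List.length_pos_of_mem h
        simp only [Option.getD_some] at *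
        have := ih (gr.erase e) (o ++ [e])
          (evolve_func a (PySem.List.pyGetD (o ++ [e]) (-1) 0) n) (by omega)
        omega
      · rw [dif_neg h]

theorem genOrbitsInner_length_le (a n : Int) (o gr : List Int) (e : Int) :
    (genOrbitsInner a n o gr e).2.length ≤ gr.length :=
  genOrbitsInner_length_le_aux a n gr.length gr o e le_rfl

-- outer 'while len(gr) > 0' loop of A
def genOrbitsOuter (a : Int) (n : Int) (Orbits : List (List Int)) (gr : List Int) :
    List (List Int) :=
  match gr with
  | [] => Orbits
  | g0 :: rest =>
    let p := genOrbitsInner a n [g0] rest (evolve_func a (PySem.List.pyGetD [g0] (-1) 0) n)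
    genOrbitsOuter a n (Orbits ++ [p.1]) p.2
termination_by gr.length
decreasing_by
  have := genOrbitsInner_length_le a n [g0] rest (evolve_func a (PySem.List.pyGetD [g0] (-1) 0) n)
  simp only [List.length_cons]
  omega

def gen_orbits (a : Int) (n : Int) (gr : List Int) : List (List Int) :=
  genOrbitsOuter a n [] gr

-- ===== PORT B =====
def evolveB (a : Int) (n : Int) (e : Int) : Int := PySem.Int.mod (a * e) n

-- phase 1 of _make_orbit: follow the chain through distinct values, consuming one copy each
-- (fuel is only a totality device; it never runs out on the fuel the caller supplies)
def walkB (a n : Int) (fuel : Nat) (walked : List Int) (visited : PySem.Set Int)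
    (rem : PySem.Dict Int Int) (e : Int) :
    List Int × PySem.Set Int × PySem.Dict Int Int × Int :=
  match fuel with
  | 0 => (walked, visited, rem, e)
  | Nat.succ f =>
    if 0 < rem.getD e 0 ∧ visited.contains e = false then
      walkB a n f (walked ++ [e]) (visited.add e) (rem.insert e (rem.getD e 0 - 1)) (evolveB a n e)
    else (walked, visited, rem, e)

-- phase 2 of _make_orbit: if the walk stopped on an already-visited value with copies left,
-- the chain closed into a cycle: emit tail + cycle*k + partial pass in closed form
def postB (a n : Int) (st : List Int × PySem.Set Int × PySem.Dict Int Int × Int) :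
    List Int × PySem.Dict Int Int :=
  let walked := st.1
  let rem := st.2.2.1
  let e := st.2.2.2
  if 0 < rem.getD e 0 then
    let cyc := walked.drop ((PySem.List.index? walked e).getD 0)
    let k := (PySem.List.min? (cyc.map (fun v => rem.getD v 0)) (fun y => y)).getD 0
    let j := cyc.findIdx (fun v => rem.getD v 0 == k)
    let rem' := (cyc.take j).foldl (fun d v => d.insert v (d.getD v 0 - 1))
                 (cyc.foldl (fun d v => d.insert v (d.getD v 0 - k)) rem)
    (walked ++ (List.replicate k.toNat cyc).flatten ++ cyc.take j, rem')
  else (walked, rem)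

def makeOrbitB (a n : Int) (fuel : Nat) (x : Int) (rem : PySem.Dict Int Int) :
    List Int × PySem.Dict Int Int :=
  postB a n (walkB a n fuel [x] (PySem.Set.add PySem.Set.empty x)
    (rem.insert x (rem.getD x 0 - 1)) (evolveB a n x))

-- the 'for x in gr' scan of B
def genOuterB (a n : Int) (total : PySem.Dict Int Int) (s : List Int)
    (rem seen : PySem.Dict Int Int) (orbits : List (List Int)) : List (List Int) :=
  match s with
  | [] => orbits
  | x :: s' =>
    let j := seen.getD x 0
    let seen' := seen.insert x (j + 1)
    if j < total.getD x 0 - rem.getD x 0 then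
      genOuterB a n total s' rem seen' orbits
    else
      let p := makeOrbitB a n s'.length x rem
      genOuterB a n total s' p.2 seen' (orbits ++ [p.1])

def gen_orbits_alt (a : Int) (n : Int) (gr : List Int) : List (List Int) :=
  genOuterB a n (PySem.Dict.counter gr) gr (PySem.Dict.counter gr)
    (PySem.Dict.empty : PySem.Dict Int Int) []

-- ===== PRECONDITION & SPEC =====
-- Pre_ excludes exactly the inputs where Python A raises ZeroDivisionError (n = 0 with nonempty gr).
def Pre_gen_orbits (a : Int) (n : Int) (gr : List Int) : Prop := gr = [] ∨ n ≠ 0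
instance (a : Int) (n : Int) (gr : List Int) : Decidable (Pre_gen_orbits a n gr) := by
  unfold Pre_gen_orbits; infer_instance

def pvWitness_gen_orbits : Int × Int × List Int := (2, 5, [1, 2, 3, 4])

def Spec_gen_orbits (a : Int) (n : Int) (gr : List Int) (out : List (List Int)) : Prop :=
  out = gen_orbits_alt a n gr
instance (a : Int) (n : Int) (gr : List Int) (out : List (List Int)) :
    Decidable (Spec_gen_orbits a n gr out) := by unfold Spec_gen_orbits; infer_instance

-- ===== CLAIM (what is proved, stated in full; the proofs are below) =====
def Claim_equal_gen_orbits : Prop := ∀ (a : Int) (n : Int) (gr : List Int),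
  Dom_gen_orbits a n gr → Pre_gen_orbits a n gr → Spec_gen_orbits a n gr (gen_orbits a n gr)

-- ===== LEMMAS AND PROOFS =====

-- 'resid s r' = the occurrences that are still unconsumed when, for each value v, the
-- earliest (count s v - r v) occurrences of v in s have been consumed: keep the last (r v) ones.
def resid (s : List Int) (r : Int → Int) : List Int :=
  match s with
  | [] => []
  | x :: s' => if (s'.count x : Int) < r x then x :: resid s' r else resid s' r

theorem resid_sublist (s : List Int) (r : Int → Int) : (resid s r).Sublist s := by
  induction s with
  | nil => simp [resid]
  | cons x s' ih =>
      rw [resid]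
      split_ifs
      · exact ih.cons₂ x
      · exact ih.cons x

theorem resid_full (s : List Int) (r : Int → Int)
    (h : ∀ v, (s.count v : Int) ≤ r v) : resid s r = s := by
  induction s with
  | nil => rfl
  | cons x s' ih =>
      rw [resid, if_pos, ih]
      · intro v
        have := h v
        have hle : s'.count v ≤ (x :: s').count v := by
          by_cases hv : v = x <;> simp [hv, List.count_cons]
        omega
      · have := h x
        simp only [List.count_cons_self] at this
        omega

theorem resid_congr (s : List Int) (r r' : Int → Int)
    (h : ∀ v, r v = r' v ∨ ((s.count v : Int) ≤ r v ∧ (s.count v : Int) ≤ r' v)) :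
    resid s r = resid s r' := by
  induction s with
  | nil => rfl
  | cons x s' ih =>
      have ih' : resid s' r = resid s' r' := by
        apply ih
        intro v
        rcases h v with hv | ⟨h1, h2⟩
        · exact Or.inl hv
        · refine Or.inr ⟨?_, ?_⟩ <;>
          · have hle : s'.count v ≤ (x :: s').count v := by
              by_cases hv : v = x <;> simp [hv, List.count_cons]
            omega
      rw [resid, resid]
      rcases h x with hx | ⟨h1, h2⟩
      · rw [hx, ih']
      · simp only [List.count_cons_self] at h1 h2
        rw [if_pos (by omega), if_pos (by omega), ih']

theorem resid_remove (s : List Int) (r : Int → Int) (e : Int)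
    (h0 : 0 < r e) (h1 : r e ≤ (s.count e : Int)) :
    (resid s r).erase e = resid s (fun v => if v = e then r e - 1 else r v) := by
  induction s with
  | nil => simp at h1; omega
  | cons x s' ih =>
      by_cases hx : x = e
      · subst hx
        simp only [List.count_cons_self] at h1
        rw [resid, resid]
        by_cases hk : (s'.count x : Int) < r x
        · rw [if_pos hk, if_neg (by simp; omega), List.erase_cons_head]
          apply resid_congr
          intro v
          by_cases hv : v = x
          · subst hv; refine Or.inr ⟨by omega, by simp; omega⟩
          · simp [hv]
        · rw [if_neg hk, if_neg (by simp; omega)]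
          exact ih (by omega)
      · rw [resid, resid]
        have hc : (x :: s').count e = s'.count e := by simp [hx]
        rw [hc] at h1
        by_cases hk : (s'.count x : Int) < r x
        · rw [if_pos hk, if_pos (by simp [hx]; omega),
            List.erase_cons_tail (by simp [hx]), ih h1]
        · rw [if_neg hk, if_neg (by simp [hx]; omega)]
          exact ih h1

-- counter-level reference form of A's inner loop (proof helper bridging A and B)
def innerCnt (a n : Int) (fuel : Nat) (orbit : List Int) (rem : PySem.Dict Int Int) (e : Int) :
    List Int × PySem.Dict Int Int :=
  match fuel with
  | 0 => (orbit, rem)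
  | Nat.succ fuel =>
    if 0 < rem.getD e 0 then
      innerCnt a n fuel (orbit ++ [e]) (rem.insert e (rem.getD e 0 - 1)) (evolveB a n e)
    else (orbit, rem)

theorem innerCnt_exit (a n : Int) (fuel : Nat) (orbit : List Int) (rem : PySem.Dict Int Int)
    (e : Int) (h : rem.getD e 0 ≤ 0) : innerCnt a n fuel orbit rem e = (orbit, rem) := by
  cases fuel with
  | zero => rfl
  | succ f => rw [innerCnt, if_neg (by omega)]

theorem counts_insert_dec (rem : PySem.Dict Int Int) (t : List Int) (x : Int)
    (hx : x ∈ t) (h : ∀ v, rem.getD v 0 = (t.count v : Int)) :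
    ∀ v, (rem.insert x (rem.getD x 0 - 1)).getD v 0 = ((t.erase x).count v : Int) := by
  intro v
  have hc1 : 1 ≤ t.count x := List.one_le_count_iff.mpr hx
  rw [PySem.Dict.getD_insert]
  by_cases hv : v = x
  · subst hv
    rw [if_pos rfl, h v, List.count_erase_self]
    omega
  · rw [if_neg hv, h v, List.count_erase_of_ne hv]

theorem inner_sim (a n : Int) : ∀ (fuel : Nat) (L : List Int) (rem : PySem.Dict Int Int)
    (orbit : List Int) (e : Int) (s : List Int),
    L.length ≤ fuel →
    (∀ v, rem.getD v 0 = (L.count v : Int)) →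
    L = resid s (fun v => rem.getD v 0) →
    (innerCnt a n fuel orbit rem e).1 = (genOrbitsInner a n orbit L e).1 ∧
    (∀ v, (innerCnt a n fuel orbit rem e).2.getD v 0 =
      ((genOrbitsInner a n orbit L e).2.count v : Int)) ∧
    (genOrbitsInner a n orbit L e).2 =
      resid s (fun v => (innerCnt a n fuel orbit rem e).2.getD v 0) ∧
    (genOrbitsInner a n orbit L e).2.Sublist L := by
  intro fuel
  induction fuel with
  | zero =>
      intro L rem orbit e s hlen hcnt hres
      have hL : L = [] := List.eq_nil_of_length_eq_zero (by omega)
      subst hL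
      rw [genOrbitsInner, dif_neg (by simp)]
      exact ⟨rfl, hcnt, hres, List.Sublist.refl _⟩
  | succ fuel ih =>
      intro L rem orbit e s hlen hcnt hres
      by_cases h : e ∈ L
      · have hc1 : 1 ≤ L.count e := List.one_le_count_iff.mpr h
        have hpos : 0 < rem.getD e 0 := by rw [hcnt e]; exact_mod_cast hc1
        rw [genOrbitsInner, dif_pos h]
        have hr := PySem.List.remove?_eq_some_erase (v := e) (xs := L) h
        rw [hr]
        simp only [Option.getD_some]
        rw [PySem.List.pyGetD_neg_one_append_singleton, evolve_func]
        rw [innerCnt, if_pos hpos]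
        have hcnt' := counts_insert_dec rem L e h hcnt
        have hres' : L.erase e =
            resid s (fun v => (rem.insert e (rem.getD e 0 - 1)).getD v 0) := by
          have hsub : L.Sublist s := hres ▸ resid_sublist s _
          have hbound : rem.getD e 0 ≤ (s.count e : Int) := by
            rw [hcnt e]; exact_mod_cast hsub.count_le e
          have hrm := resid_remove s (fun v => rem.getD v 0) e hpos hbound
          rw [← hres] at hrm
          rw [hrm]
          congr 1
          funext v
          rw [PySem.Dict.getD_insert]
        have hlen' : (L.erase e).length ≤ fuel := by
          have h1 := List.length_erase_of_mem h
          have h2 : 0 < L.length := List.length_pos_of_mem h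
          omega
        obtain ⟨c1, c2, c3, c4⟩ := ih (L.erase e) (rem.insert e (rem.getD e 0 - 1))
          (orbit ++ [e]) (evolveB a n e) s hlen' hcnt' hres'
        exact ⟨c1, c2, c3, c4.trans List.erase_sublist⟩
      · have hneg : ¬ 0 < rem.getD e 0 := by
          rw [hcnt e, List.count_eq_zero_of_not_mem h]
          simp
        rw [genOrbitsInner, dif_neg h, innerCnt, if_neg hneg]
        exact ⟨rfl, hcnt, hres, List.Sublist.refl _⟩

-- chain predicate: consecutive evolveB-links inside the list, and the last element maps to e
def chainW (a n : Int) : List Int → Int → Prop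
  | [], _ => True
  | [x], e => evolveB a n x = e
  | x :: y :: rest, e => evolveB a n x = y ∧ chainW a n (y :: rest) e

theorem chainW_tail (a n : Int) (x : Int) (w : List Int) (e : Int)
    (h : chainW a n (x :: w) e) : chainW a n w e := by
  cases w with
  | nil => trivial
  | cons y r => exact h.2

theorem chainW_append_singleton (a n : Int) : ∀ (w : List Int) (e : Int),
    chainW a n w e → chainW a n (w ++ [e]) (evolveB a n e) := by
  intro w
  induction w with
  | nil => intro e _; simp [chainW]
  | cons x w' ih =>
      intro e h
      cases w' with
      | nil => exact ⟨h, rfl⟩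
      | cons y r => exact ⟨h.1, ih e h.2⟩

theorem chainW_drop (a n : Int) (w : List Int) (e : Int) (h : chainW a n w e) :
    ∀ i, chainW a n (w.drop i) e := by
  intro i
  induction i with
  | zero => simpa using h
  | succ i ih =>
      rw [← List.tail_drop]
      cases hd : w.drop i with
      | nil => simp [chainW]
      | cons y r => have := hd ▸ ih; exact chainW_tail a n y r e this

theorem chainW_take (a n : Int) : ∀ (p : List Int) (j : Nat) (e : Int) (hj : j < p.length),
    chainW a n p e → chainW a n (p.take j) (p[j]'hj) := by
  intro p
  induction p with
  | nil => intro j e hj; simp at hj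
  | cons x rest ih =>
      intro j e hj h
      cases j with
      | zero => simp [chainW]
      | succ j' =>
          simp only [List.length_cons, Nat.add_lt_add_iff_right] at hj
          cases rest with
          | nil => simp at hj
          | cons y r =>
              have hx : evolveB a n x = y := h.1
              have ihh := ih j' e hj h.2
              simp only [List.take_succ_cons, List.getElem_cons_succ]
              cases hj' : (y :: r).take j' with
              | nil =>
                  cases j' with
                  | zero =>
                      simp only [List.take_zero] at *
                      simp [chainW, hx]
                  | succ m => simp at hj'
              | cons z q =>
                  have hz : z = y := by
                    cases j' with
                    | zero => simp at hj'
                    | succ m => simp [List.take_succ_cons] at hj'; exact hj'.1.symm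
                  subst hz
                  exact ⟨hx, hj' ▸ ihh⟩

-- getD after a fold of 'insert v (getD v - c)' over a nodup list
theorem getD_foldl_dec (c : Int) : ∀ (p : List Int) (rem : PySem.Dict Int Int) (v : Int),
    p.Nodup →
    (p.foldl (fun d u => d.insert u (d.getD u 0 - c)) rem).getD v 0 =
      if v ∈ p then rem.getD v 0 - c else rem.getD v 0 := by
  intro p
  induction p with
  | nil => intro rem v _; simp
  | cons x p' ih =>
      intro rem v hnd
      have hx : x ∉ p' := (List.nodup_cons.mp hnd).1
      rw [List.foldl_cons, ih _ v (List.nodup_cons.mp hnd).2]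
      by_cases hv : v ∈ p'
      · have hvx : v ≠ x := fun h => hx (h ▸ hv)
        rw [if_pos hv, if_pos (List.mem_cons_of_mem x hv), PySem.Dict.getD_insert, if_neg hvx]
      · rw [if_neg hv, PySem.Dict.getD_insert]
        by_cases hvx : v = x
        · subst hvx; rw [if_pos rfl, if_pos (List.mem_cons_self)]
        · rw [if_neg hvx, if_neg (by simp [hvx, hv])]

theorem decAll_counts : ∀ (p : List Int) (rem : PySem.Dict Int Int) (t : List Int),
    p.Nodup → (∀ v ∈ p, 0 < rem.getD v 0) →
    (∀ v, rem.getD v 0 = (t.count v : Int)) →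
    ∃ t' : List Int, (∀ v, (p.foldl (fun d u => d.insert u (d.getD u 0 - 1)) rem).getD v 0 = (t'.count v : Int))
      ∧ t'.length + p.length = t.length := by
  intro p
  induction p with
  | nil => intro rem t _ _ hcnt; exact ⟨t, hcnt, by simp⟩
  | cons x p' ih =>
      intro rem t hnd hpos hcnt
      have hx : x ∈ t := by
        have := hpos x List.mem_cons_self
        rw [hcnt x] at this
        exact List.count_pos_iff.mp (by exact_mod_cast this)
      have hcnt' := counts_insert_dec rem t x hx hcnt
      have hpos' : ∀ v ∈ p', 0 < (rem.insert x (rem.getD x 0 - 1)).getD v 0 := by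
        intro v hv
        have hvx : v ≠ x := fun h => (List.nodup_cons.mp hnd).1 (h ▸ hv)
        rw [PySem.Dict.getD_insert, if_neg hvx]
        exact hpos v (List.mem_cons_of_mem x hv)
      obtain ⟨t', h1, h2⟩ := ih _ (t.erase x) (List.nodup_cons.mp hnd).2 hpos' hcnt'
      refine ⟨t', h1, ?_⟩
      have := List.length_erase_of_mem hx
      have hlen : 0 < t.length := List.length_pos_of_mem hx
      simp only [List.length_cons]
      omega

-- one pass along a chain all of whose values still have copies left
theorem pass_lemma (a n : Int) : ∀ (p : List Int) (fuel : Nat) (orbit : List Int)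
    (rem : PySem.Dict Int Int) (t : List Int) (e' : Int),
    chainW a n p e' → p.Nodup → (∀ v ∈ p, 0 < rem.getD v 0) →
    (∀ v, rem.getD v 0 = (t.count v : Int)) → t.length ≤ fuel →
    innerCnt a n fuel orbit rem (p.headD e') =
      innerCnt a n (fuel - p.length) (orbit ++ p)
        (p.foldl (fun d u => d.insert u (d.getD u 0 - 1)) rem) e' := by
  intro p
  induction p with
  | nil => intro fuel orbit rem t e' _ _ _ _ _; simp
  | cons x p' ih =>
      intro fuel orbit rem t e' hch hnd hpos hcnt hlen
      have hx0 : 0 < rem.getD x 0 := hpos x List.mem_cons_self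
      have hxt : x ∈ t := by
        rw [hcnt x] at hx0
        exact List.count_pos_iff.mp (by exact_mod_cast hx0)
      have htl : 0 < t.length := List.length_pos_of_mem hxt
      cases fuel with
      | zero => omega
      | succ f =>
          have step : innerCnt a n (Nat.succ f) orbit rem ((x :: p').headD e') =
              innerCnt a n f (orbit ++ [x]) (rem.insert x (rem.getD x 0 - 1)) (evolveB a n x) := by
            simp only [List.headD_cons]
            rw [innerCnt, if_pos hx0]
          rw [step]
          have hcnt' := counts_insert_dec rem t x hxt hcnt
          have hpos' : ∀ v ∈ p', 0 < (rem.insert x (rem.getD x 0 - 1)).getD v 0 := by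
            intro v hv
            have hvx : v ≠ x := fun h => (List.nodup_cons.mp hnd).1 (h ▸ hv)
            rw [PySem.Dict.getD_insert, if_neg hvx]
            exact hpos v (List.mem_cons_of_mem x hv)
          have hlen' : (t.erase x).length ≤ f := by
            have := List.length_erase_of_mem hxt
            omega
          cases p' with
          | nil =>
              have he : evolveB a n x = e' := hch
              simp only [List.foldl_cons, List.foldl_nil, List.length_cons, List.length_nil]
              rw [he]
              simp
          | cons y r =>
              have hhd : evolveB a n x = (y :: r).headD e' := by
                simp only [List.headD_cons]; exact hch.1
              rw [hhd, ih f (orbit ++ [x]) _ (t.erase x) e' hch.2 (List.nodup_cons.mp hnd).2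
                hpos' hcnt' hlen']
              simp only [List.foldl_cons, List.length_cons]
              have hor : (orbit ++ [x]) ++ y :: r = orbit ++ x :: y :: r := by simp
              have hfu : f - (r.length + 1) = f + 1 - (r.length + 1 + 1) := by omega
              rw [hor, hfu]

-- headD of a take-prefix agrees with the list's head
theorem headD_take (p : List Int) (j : Nat) (hj : j < p.length) (hne : p ≠ []) :
    (p.take j).headD (p[j]'hj) = p.headD 0 := by
  cases p with
  | nil => simp at hne
  | cons x rest =>
      cases j with
      | zero => simp
      | succ j' => simp [List.take_succ_cons]

-- the orbit that starts a full cycle: k = scarcest remaining count, j = where it is first hit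
theorem cyc_lemma (a n : Int) : ∀ (kN : Nat) (cyc : List Int) (j : Nat) (fuel : Nat)
    (orbit : List Int) (rem : PySem.Dict Int Int) (t : List Int) (hj : j < cyc.length),
    cyc ≠ [] → cyc.Nodup → chainW a n cyc (cyc.headD 0) →
    (∀ v ∈ cyc, (kN : Int) ≤ rem.getD v 0) →
    rem.getD (cyc[j]'hj) 0 = (kN : Int) →
    (∀ q (hq : q < j), rem.getD (cyc[q]'(Nat.lt_trans hq hj)) 0 ≠ (kN : Int)) →
    (∀ v, rem.getD v 0 = (t.count v : Int)) → t.length ≤ fuel →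
    (innerCnt a n fuel orbit rem (cyc.headD 0)).1
        = orbit ++ (List.replicate kN cyc).flatten ++ cyc.take j ∧
    ∀ v, (innerCnt a n fuel orbit rem (cyc.headD 0)).2.getD v 0
        = rem.getD v 0 - (if v ∈ cyc then (kN : Int) else 0)
          - (if v ∈ cyc.take j then 1 else 0) := by
  intro kN
  induction kN with
  | zero =>
      intro cyc j fuel orbit rem t hj hne hnd hch hall hjk hbef hcnt hlen
      have hndtake : (cyc.take j).Nodup := (List.take_sublist j cyc).nodup hnd
      have hpos : ∀ v ∈ cyc.take j, 0 < rem.getD v 0 := by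
        intro v hv
        obtain ⟨q, hq, hvq⟩ := List.mem_iff_getElem.mp hv
        have hqlen : q < j := by
          have := hq
          simp [List.length_take] at this
          omega
        have hqc : q < cyc.length := Nat.lt_trans hqlen hj
        have hvq' : cyc[q]'hqc = v := by
          rw [← hvq, List.getElem_take]
        have h1 := hbef q hqlen
        rw [hvq'] at h1
        have h2 := hall v ((List.take_sublist j cyc).mem hv)
        simp only [Nat.cast_zero] at h1 h2 ⊢
        omega
      have htk : chainW a n (cyc.take j) (cyc[j]'hj) := chainW_take a n cyc j _ hj hch
      have hpass := pass_lemma a n (cyc.take j) fuel orbit rem t (cyc[j]'hj)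
        htk hndtake hpos hcnt hlen
      rw [headD_take cyc j hj hne] at hpass
      have hjnot : (cyc[j]'hj) ∉ cyc.take j := by
        intro hmem
        obtain ⟨q, hq, hvq⟩ := List.mem_iff_getElem.mp hmem
        have hqlen : q < j := by
          simp [List.length_take] at hq
          omega
        have hqc : q < cyc.length := Nat.lt_trans hqlen hj
        rw [List.getElem_take] at hvq
        have := hnd.getElem_inj_iff.mp hvq
        omega
      have hexit : ((cyc.take j).foldl (fun d u => d.insert u (d.getD u 0 - 1)) rem).getD
          (cyc[j]'hj) 0 ≤ 0 := by
        rw [getD_foldl_dec 1 _ _ _ hndtake, if_neg hjnot, hjk]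
        simp
      rw [hpass, innerCnt_exit a n _ _ _ _ hexit]
      constructor
      · simp
      · intro v
        rw [getD_foldl_dec 1 _ _ _ hndtake]
        by_cases hv : v ∈ cyc.take j
        · rw [if_pos hv, if_pos hv, if_pos ((List.take_sublist j cyc).mem hv)]
          simp only [Nat.cast_zero]
          omega
        · rw [if_neg hv, if_neg hv]
          simp only [Nat.cast_zero]
          omega
  | succ kN ih =>
      intro cyc j fuel orbit rem t hj hne hnd hch hall hjk hbef hcnt hlen
      have hpos : ∀ v ∈ cyc, 0 < rem.getD v 0 := by
        intro v hv
        have := hall v hv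
        push_cast at this
        omega
      have hpass := pass_lemma a n cyc fuel orbit rem t (cyc.headD 0) hch hnd hpos hcnt hlen
      have hhd : cyc.headD (cyc.headD 0) = cyc.headD 0 := by
        cases cyc with
        | nil => rfl
        | cons x r => rfl
      rw [hhd] at hpass
      set rem' := cyc.foldl (fun d u => d.insert u (d.getD u 0 - 1)) rem with hrem'
      have hrem'v : ∀ v, rem'.getD v 0 = if v ∈ cyc then rem.getD v 0 - 1 else rem.getD v 0 := by
        intro v; rw [hrem', getD_foldl_dec 1 _ _ _ hnd]
      obtain ⟨t', ht'c, ht'l⟩ := decAll_counts cyc rem t hnd hpos hcnt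
      rw [← hrem'] at ht'c
      have hall' : ∀ v ∈ cyc, (kN : Int) ≤ rem'.getD v 0 := by
        intro v hv
        rw [hrem'v v, if_pos hv]
        have := hall v hv
        push_cast at this ⊢
        omega
      have hjk' : rem'.getD (cyc[j]'hj) 0 = (kN : Int) := by
        rw [hrem'v _, if_pos (List.getElem_mem hj), hjk]
        push_cast
        ring
      have hbef' : ∀ q (hq : q < j), rem'.getD (cyc[q]'(Nat.lt_trans hq hj)) 0 ≠ (kN : Int) := by
        intro q hq
        rw [hrem'v _, if_pos (List.getElem_mem _)]
        have h1 := hbef q hq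
        have h2 := hall _ (List.getElem_mem (Nat.lt_trans hq hj))
        push_cast at h1 h2 ⊢
        omega
      have hlen' : t'.length ≤ fuel - cyc.length := by omega
      obtain ⟨ih1, ih2⟩ := ih cyc j (fuel - cyc.length) (orbit ++ cyc) rem' t' hj hne hnd hch
        hall' hjk' hbef' ht'c hlen'
      rw [hpass]
      constructor
      · rw [ih1, List.replicate_succ, List.flatten_cons]
        simp [List.append_assoc]
      · intro v
        rw [ih2 v, hrem'v v]
        by_cases hv : v ∈ cyc
        · rw [if_pos hv, if_pos hv, if_pos hv]
          push_cast
          ring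
        · have hv2 : v ∉ cyc.take j := fun h => hv ((List.take_sublist j cyc).mem h)
          simp [hv, hv2]

-- B's walk + closed-form post-processing computes exactly the counter form of A's inner loop
theorem walkB_sim (a n : Int) : ∀ (fuel : Nat) (walked : List Int) (visited : PySem.Set Int)
    (rem : PySem.Dict Int Int) (e : Int) (t : List Int),
    (∀ v, rem.getD v 0 = (t.count v : Int)) → t.length ≤ fuel →
    (∀ v : Int, visited.contains v = true ↔ v ∈ walked) →
    walked ≠ [] → walked.Nodup → chainW a n walked e →
    (postB a n (walkB a n fuel walked visited rem e)).1 = (innerCnt a n fuel walked rem e).1 ∧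
    ∀ v, (postB a n (walkB a n fuel walked visited rem e)).2.getD v 0
        = (innerCnt a n fuel walked rem e).2.getD v 0 := by
  intro fuel
  induction fuel with
  | zero =>
      intro walked visited rem e t hcnt hlen _ _ _ _
      have ht : t = [] := List.eq_nil_of_length_eq_zero (by omega)
      have h0 : rem.getD e 0 = 0 := by rw [hcnt e, ht]; simp
      rw [walkB]
      simp only [postB, innerCnt]
      rw [if_neg (by omega)]
      exact ⟨rfl, fun v => rfl⟩
  | succ f ih =>
      intro walked visited rem e t hcnt hlen hvis hne hnd hch
      rw [walkB]
      by_cases hc : 0 < rem.getD e 0 ∧ visited.contains e = false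
      · rw [if_pos hc]
        have hew : e ∉ walked := by
          intro hmem
          have := (hvis e).mpr hmem
          rw [hc.2] at this
          exact Bool.false_ne_true this
        have het : e ∈ t := by
          have := hc.1
          rw [hcnt e] at this
          exact List.count_pos_iff.mp (by exact_mod_cast this)
        have hcnt' := counts_insert_dec rem t e het hcnt
        have hlen' : (t.erase e).length ≤ f := by
          have := List.length_erase_of_mem het
          have := List.length_pos_of_mem het
          omega
        have hvis' : ∀ v : Int, (visited.add e).contains v = true ↔ v ∈ walked ++ [e] := by
          intro v
          rw [show ((visited.add e).contains v = true) ↔ v ∈ visited.add e by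
            simp [PySem.Set.contains]]
          rw [PySem.Set.mem_add]
          rw [show (v ∈ visited) ↔ (visited.contains v = true) by
            simp [PySem.Set.contains]]
          rw [hvis v]
          simp
      -- note: v ∈ walked ++ [e] ↔ v ∈ walked ∨ v = e
        have hnd' : (walked ++ [e]).Nodup :=
          hnd.append (List.nodup_singleton e) (List.disjoint_singleton.mpr hew)
        have hch' : chainW a n (walked ++ [e]) (evolveB a n e) :=
          chainW_append_singleton a n walked e hch
        have := ih (walked ++ [e]) (visited.add e) (rem.insert e (rem.getD e 0 - 1))
          (evolveB a n e) (t.erase e) hcnt' hlen' hvis' (by simp) hnd' hch'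
        rw [innerCnt, if_pos hc.1]
        exact this
      · rw [if_neg hc]
        by_cases h1 : 0 < rem.getD e 0
        · -- cycle: e already visited
          have hev : visited.contains e = true := by
            rcases Bool.eq_false_or_eq_true (visited.contains e) with hb | hb
            · exact hb
            · exact absurd ⟨h1, hb⟩ hc
          have hew : e ∈ walked := (hvis e).mp hev
          obtain ⟨i0, hi0⟩ : ∃ i0, PySem.List.index? walked e = some i0 := by
            have := (PySem.List.index?_isSome_iff walked e).mpr hew
            exact Option.isSome_iff_exists.mp this
          obtain ⟨hk, hwi, _⟩ := PySem.List.getElem_of_index?_eq_some hi0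
          simp only [postB, hi0, Option.getD_some]
          set cyc := walked.drop i0 with hcyc
          have hcyclen : 0 < cyc.length := by
            rw [hcyc, List.length_drop]
            omega
          have hcycne : cyc ≠ [] := by
            intro h
            rw [h] at hcyclen
            simp at hcyclen
          have hcycnd : cyc.Nodup := (List.drop_sublist i0 walked).nodup hnd
          have hhead : cyc.headD 0 = e := by
            rw [List.headD_eq_head?, hcyc, List.head?_drop]
            rw [List.getElem?_eq_getElem hk, hwi]
            rfl
          have hchc : chainW a n cyc (cyc.headD 0) := by
            rw [hhead]
            exact chainW_drop a n walked e hch i0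
          -- the minimum of the remaining counts over the cycle
          obtain ⟨m, hm⟩ : ∃ m, PySem.List.min? (cyc.map (fun v => rem.getD v 0)) (fun y => y)
              = some m := by
            rcases ho : PySem.List.min? (cyc.map (fun v => rem.getD v 0)) (fun y => y) with _ | m
            · rw [PySem.List.min?_eq_none_iff] at ho
              simp [List.map_eq_nil_iff] at ho
              exact absurd ho hcycne
            · exact ⟨m, rfl⟩
          have hmmem := PySem.List.min?_mem hm
          obtain ⟨vm, hvmc, hvm⟩ := List.mem_map.mp hmmem
          have hmin : ∀ v ∈ cyc, m ≤ rem.getD v 0 := by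
            intro v hv
            have := PySem.List.min?_isMin hm (rem.getD v 0) (List.mem_map.mpr ⟨v, hv, rfl⟩)
            simpa using this
          have hm0 : 0 ≤ m := by
            rw [← hvm, hcnt vm]
            positivity
          set j := cyc.findIdx (fun v => rem.getD v 0 == m) with hjdef
          have hex : ∃ v ∈ cyc, (fun v => rem.getD v 0 == m) v = true :=
            ⟨vm, hvmc, by simp [hvm]⟩
          have hj : j < cyc.length := List.findIdx_lt_length_of_exists hex
          have hjk : rem.getD (cyc[j]'hj) 0 = m := by
            have := List.findIdx_getElem (w := hj)
            simpa using this
          have hbef : ∀ q (hq : q < j), rem.getD (cyc[q]'(Nat.lt_trans hq hj)) 0 ≠ m := by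
            intro q hq
            have := List.not_of_lt_findIdx hq
            simpa using this
          have hmN : ((m.toNat : Nat) : Int) = m := Int.toNat_of_nonneg hm0
          obtain ⟨cl1, cl2⟩ := cyc_lemma a n m.toNat cyc j (Nat.succ f) walked rem t hj
            hcycne hcycnd hchc (by rw [hmN]; exact hmin) (by rw [hmN]; exact hjk)
            (by intro q hq; rw [hmN]; exact hbef q hq) hcnt hlen
          rw [hhead] at cl1 cl2
          simp only [hm, Option.getD_some]
          rw [if_pos h1, ← hjdef]
          refine ⟨cl1.symm, ?_⟩
          intro v
          rw [cl2 v]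
          have hndtake : (cyc.take j).Nodup := (List.take_sublist j cyc).nodup hcycnd
          rw [getD_foldl_dec 1 _ _ _ hndtake, getD_foldl_dec m _ _ _ hcycnd]
          by_cases hv1 : v ∈ cyc.take j
          · have hv2 : v ∈ cyc := (List.take_sublist j cyc).mem hv1
            rw [if_pos hv1, if_pos hv2, if_pos hv2, if_pos hv1, hmN]
          · rw [if_neg hv1, if_neg hv1]
            by_cases hv2 : v ∈ cyc
            · rw [if_pos hv2, if_pos hv2, hmN]
              omega
            · rw [if_neg hv2, if_neg hv2]
              omega
        · -- the walk stopped because the next value has no copies left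
          simp only [postB, innerCnt]
          rw [if_neg h1, if_neg h1]
          exact ⟨rfl, fun v => rfl⟩

-- outer loops: B's scan computes A's peeling (same invariants as the inner simulation)
theorem outer_simB (a n : Int) (gr0 : List Int) (total : PySem.Dict Int Int)
    (htot : ∀ v, total.getD v 0 = (gr0.count v : Int)) :
    ∀ (s : List Int) (rem seen : PySem.Dict Int Int) (orbits : List (List Int)) (L : List Int),
    (∀ v, rem.getD v 0 = (L.count v : Int)) →
    L = resid s (fun v => rem.getD v 0) →
    (∀ v, seen.getD v 0 = (gr0.count v : Int) - (s.count v : Int)) →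
    genOuterB a n total s rem seen orbits = genOrbitsOuter a n orbits L := by
  intro s
  induction s with
  | nil =>
      intro rem seen orbits L hcnt hres hseen
      have hL : L = [] := by rw [hres]; rfl
      subst hL
      rw [genOuterB, genOrbitsOuter]
  | cons x s' ih =>
      intro rem seen orbits L hcnt hres hseen
      have hseen' : ∀ v, (seen.insert x (seen.getD x 0 + 1)).getD v 0 =
          (gr0.count v : Int) - (s'.count v : Int) := by
        intro v
        rw [PySem.Dict.getD_insert]
        by_cases hv : v = x
        · subst hv
          rw [if_pos rfl, hseen v, List.count_cons_self]
          push_cast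
          ring
        · rw [if_neg hv, hseen v, List.count_cons_of_ne (fun hh => hv hh.symm)]
      rw [genOuterB]
      by_cases hk : (s'.count x : Int) < rem.getD x 0
      · -- this occurrence of x is still unconsumed: B starts a new orbit, A's list head is x
        have hL : L = x :: resid s' (fun v => rem.getD v 0) := by
          rw [hres, resid, if_pos hk]
        set t : List Int := resid s' (fun v => rem.getD v 0) with ht
        have hcount_x : rem.getD x 0 = (t.count x : Int) + 1 := by
          rw [hcnt x, hL, List.count_cons_self]; push_cast; ring
        rw [if_neg (by rw [hseen x, htot x, List.count_cons_self]; push_cast; omega)]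
        rw [hL, genOrbitsOuter]
        simp only
        rw [show PySem.List.pyGetD [x] (-1) 0 = x from rfl, evolve_func,
          show PySem.Int.mod (a * x) n = evolveB a n x from rfl]
        -- inner-loop hypotheses
        have hlen1 : t.length ≤ s'.length := (resid_sublist s' _).length_le
        have hcnt1 : ∀ v, (rem.insert x (rem.getD x 0 - 1)).getD v 0 = (t.count v : Int) := by
          intro v
          rw [PySem.Dict.getD_insert]
          by_cases hv : v = x
          · subst hv; rw [if_pos rfl, hcount_x]; ring
          · rw [if_neg hv, hcnt v, hL, List.count_cons_of_ne (fun hh => hv hh.symm)]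
        have hres1 : t = resid (x :: s') (fun v => (rem.insert x (rem.getD x 0 - 1)).getD v 0) := by
          have hpos : 0 < rem.getD x 0 := by
            rw [hcount_x]; positivity
          have hsub : L.Sublist (x :: s') := hres ▸ resid_sublist (x :: s') _
          have hbound : rem.getD x 0 ≤ ((x :: s').count x : Int) := by
            rw [hcnt x]; exact_mod_cast hsub.count_le x
          have hrm := resid_remove (x :: s') (fun v => rem.getD v 0) x hpos hbound
          rw [← hres, hL, List.erase_cons_head] at hrm
          rw [hrm]
          congr 1
          funext v
          rw [PySem.Dict.getD_insert]
        -- B's orbit construction equals the counter form of A's inner loop …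
        obtain ⟨w1, w2⟩ := walkB_sim a n s'.length [x] (PySem.Set.add PySem.Set.empty x)
          (rem.insert x (rem.getD x 0 - 1)) (evolveB a n x) t hcnt1 hlen1
          (by
            intro v
            simp [PySem.Set.contains, PySem.Set.add, PySem.Set.empty])
          (by simp) (by simp) (by simp [chainW])
        -- … which in turn computes A's inner loop on the residual list
        obtain ⟨c1, c2, c3, c4⟩ := inner_sim a n s'.length t (rem.insert x (rem.getD x 0 - 1))
          [x] (evolveB a n x) (x :: s') hlen1 hcnt1 hres1
        have horb : (makeOrbitB a n s'.length x rem).1 =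
            (genOrbitsInner a n [x] t (evolveB a n x)).1 := by
          rw [makeOrbitB, w1]
          exact c1
        have hremv : ∀ v, (makeOrbitB a n s'.length x rem).2.getD v 0 =
            ((genOrbitsInner a n [x] t (evolveB a n x)).2.count v : Int) := by
          intro v
          rw [makeOrbitB, w2 v]
          exact c2 v
        rw [horb]
        apply ih _ _ _ _ hremv
        · -- the result list of the inner loop is still the residual of the unscanned suffix
          have hno : ¬ ((s'.count x : Int) < (makeOrbitB a n s'.length x rem).2.getD x 0) := by
            rw [hremv x]
            have hsb := (c4.trans (resid_sublist s' _)).count_le x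
            omega
          have c3' : (genOrbitsInner a n [x] t (evolveB a n x)).2 =
              resid (x :: s') (fun v => (makeOrbitB a n s'.length x rem).2.getD v 0) := by
            rw [c3]
            congr 1
            funext v
            rw [makeOrbitB, w2 v]
          rw [c3', resid, if_neg hno]
        · exact hseen'
      · -- this copy of x was already consumed by an earlier orbit: B skips, A's list is unchanged
        rw [if_pos (by rw [hseen x, htot x, List.count_cons_self]; push_cast; omega)]
        apply ih _ _ _ _ hcnt
        · rw [hres, resid, if_neg hk]
        · exact hseen'

-- ===== VERDICT (by name: the statement is the Claim_ definition above) =====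
theorem gen_orbits_spec : Claim_equal_gen_orbits := by
  intro a n gr _ _
  unfold Spec_gen_orbits gen_orbits gen_orbits_alt
  refine (outer_simB a n gr (PySem.Dict.counter gr) (fun v => PySem.Dict.getD_counter gr v)
    gr (PySem.Dict.counter gr) PySem.Dict.empty [] gr
    (fun v => PySem.Dict.getD_counter gr v) ?_ ?_).symm
  · rw [resid_full]
    intro v
    rw [PySem.Dict.getD_counter]
  · intro v
    simp [PySem.Dict.getD_empty]
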